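-- pv_equiv track=rewrite | github.com/WolfyCodeK/statsbomb-data-analysis-EXSW | database/formattedDataHandler.py | getCompetitionStageFormattedData
-- ===== SOURCE A (Python) =====
-- def getCompetitionStageFormattedData(jsonData) -> list:
--     formattedData = []
--
--     for i in range(len(jsonData)):
--         jsonDict = jsonData[i]
--         competitionStage = jsonDict["competition_stage"]
--
--         formattedData.append((
--             competitionStage["id"],
--             competitionStage["name"]
--         ))
--
--     # Remove duplicate tuples
--     formattedData = list(dict.fromkeys(formattedData))
--
--     return formattedData
-- ===== SOURCE B (Python) =====
-- def getCompetitionStageFormattedData(jsonData) -> list: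
--     # Recursive head-and-filter dedup: keep the head tuple, strip all its later
--     # copies from the tail, recurse. No hashing (no dict/set) at all.
--     tuples = [(d["competition_stage"]["id"], d["competition_stage"]["name"])
--               for d in jsonData]
--
--     def dedup(ts):
--         if not ts:
--             return []
--         h = ts[0]
--         return [h] + dedup([t for t in ts[1:] if t != h])
--
--     return dedup(tuples)
-- ===== Notes on version B (the rewrite author's own statement) =====
-- stated objective: alternative
-- what changed: Replaces the hash-based dict.fromkeys dedup with a recursive head-and-filter dedup (keep the first tuple, filter all its copies out of the tail, recurse), using no dict/set at all; quadratic but hash-free.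
import Mathlib
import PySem

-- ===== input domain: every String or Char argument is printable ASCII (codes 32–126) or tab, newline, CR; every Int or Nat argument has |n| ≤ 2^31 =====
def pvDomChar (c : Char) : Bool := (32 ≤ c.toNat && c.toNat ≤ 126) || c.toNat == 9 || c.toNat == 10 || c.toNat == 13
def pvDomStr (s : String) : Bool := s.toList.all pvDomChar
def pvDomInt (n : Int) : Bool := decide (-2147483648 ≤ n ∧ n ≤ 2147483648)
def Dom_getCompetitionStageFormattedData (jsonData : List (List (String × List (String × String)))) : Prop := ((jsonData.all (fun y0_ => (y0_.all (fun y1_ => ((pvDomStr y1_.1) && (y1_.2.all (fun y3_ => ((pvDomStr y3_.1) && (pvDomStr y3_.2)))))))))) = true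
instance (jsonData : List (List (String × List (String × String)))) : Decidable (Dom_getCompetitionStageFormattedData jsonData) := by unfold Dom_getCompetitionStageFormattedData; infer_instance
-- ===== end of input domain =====

-- B replaces A's hash-based dict.fromkeys dedup by a recursive head-and-filter dedup (no dict/set); same return value (objective: alternative).

-- ===== PORT A =====
-- A: build the full (id, name) list, then dedup with dict.fromkeys (= PySem.List.dedup).
def getCompetitionStageFormattedData (jsonData : List (List (String × List (String × String)))) : List (String × String) :=
  let formattedData :=
    jsonData.foldl (fun acc jsonDict =>
      let competitionStage := (jsonDict.lookup "competition_stage").getD []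
      acc ++ [((competitionStage.lookup "id").getD "", (competitionStage.lookup "name").getD "")]) []
  PySem.List.dedup formattedData

-- ===== PORT B =====
-- B's recursive dedup: keep the head, filter its copies out of the tail, recurse.
def altDedup (ts : List (String × String)) : List (String × String) :=
  match ts with
  | [] => []
  | h :: t => h :: altDedup (t.filter (fun x => !(x == h)))
termination_by ts.length
decreasing_by
  simpa using Nat.lt_succ_of_le (List.length_filter_le _ t.attach)

-- B: extract the tuples by a map (the comprehension), then altDedup.
def getCompetitionStageFormattedData_alt (jsonData : List (List (String × List (String × String)))) : List (String × String) :=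
  let tuples := jsonData.map (fun d =>
    let competitionStage := (d.lookup "competition_stage").getD []
    ((competitionStage.lookup "id").getD "", (competitionStage.lookup "name").getD ""))
  altDedup tuples

-- ===== PRECONDITION & SPEC =====
-- Pre_ excludes exactly the inputs where Python A raises KeyError: some element lacks the
-- "competition_stage" key, or that sub-dict lacks "id" or "name".
def Pre_getCompetitionStageFormattedData (jsonData : List (List (String × List (String × String)))) : Prop :=
  (jsonData.all (fun jsonDict =>
    match jsonDict.lookup "competition_stage" with
    | some cs => ((cs.lookup "id").isSome && (cs.lookup "name").isSome)
    | none => false)) = true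

instance (jsonData : List (List (String × List (String × String)))) : Decidable (Pre_getCompetitionStageFormattedData jsonData) := by unfold Pre_getCompetitionStageFormattedData; infer_instance

def pvWitness_getCompetitionStageFormattedData : (List (List (String × List (String × String)))) :=
  [[("competition_stage", [("id", "1"), ("name", "Group Stage")])],
   [("competition_stage", [("id", "1"), ("name", "Group Stage")])]]

def Spec_getCompetitionStageFormattedData (jsonData : List (List (String × List (String × String)))) (out : List (String × String)) : Prop := out = getCompetitionStageFormattedData_alt jsonData
instance (jsonData : List (List (String × List (String × String)))) (out : List (String × String)) : Decidable (Spec_getCompetitionStageFormattedData jsonData out) := by unfold Spec_getCompetitionStageFormattedData; infer_instance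

-- ===== CLAIM =====
def Claim_equal_getCompetitionStageFormattedData : Prop := ∀ (jsonData : List (List (String × List (String × String)))), Dom_getCompetitionStageFormattedData jsonData → Pre_getCompetitionStageFormattedData jsonData → Spec_getCompetitionStageFormattedData jsonData (getCompetitionStageFormattedData jsonData)

-- ===== LEMMAS AND PROOFS =====

-- the tuple both programs extract from one record
def pvExtract (jsonDict : List (String × List (String × String))) : String × String :=
  let competitionStage := (jsonDict.lookup "competition_stage").getD []
  ((competitionStage.lookup "id").getD "", (competitionStage.lookup "name").getD "")

-- A's build loop is a map
theorem pvBuild_eq_map {A B : Type} (f : A → B) (xs : List A) (acc : List B) :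
    xs.foldl (fun acc x => acc ++ [f x]) acc = acc ++ xs.map f := by
  induction xs generalizing acc with
  | nil => simp
  | cons x xs ih => simp [List.foldl, ih]

-- elements already in the accumulator may be filtered out before folding Set.add
theorem pvFoldl_add_filter {B : Type} [BEq B] [LawfulBEq B] (h : B) (xs : List B)
    (acc : PySem.Set B) (hmem : h ∈ acc) :
    xs.foldl PySem.Set.add acc = (xs.filter (fun x => !(x == h))).foldl PySem.Set.add acc := by
  induction xs generalizing acc with
  | nil => rfl
  | cons x xs ih =>
    by_cases hx : x = h
    · subst hx
      have : PySem.Set.add acc x = acc := PySem.Set.add_of_mem hmem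
      simp [List.filter, List.foldl, this, ih acc hmem]
    · have hmem' : h ∈ PySem.Set.add acc x := by
        simp [PySem.Set.add]
        split <;> simp [hmem]
      have : (!x == h) = true := by simp [hx]
      simp [List.filter, List.foldl, this, ih _ hmem']

-- if no element of xs equals h, a leading h in the accumulator just carries through
theorem pvFoldl_add_cons {B : Type} [BEq B] [LawfulBEq B] (h : B) (xs : List B)
    (acc : PySem.Set B) (hno : ∀ x ∈ xs, x ≠ h) :
    xs.foldl PySem.Set.add (h :: acc) = h :: xs.foldl PySem.Set.add acc := by
  induction xs generalizing acc with
  | nil => rfl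
  | cons x xs ih =>
    have hxh : x ≠ h := hno x (by simp)
    have hstep : PySem.Set.add (h :: acc) x = h :: PySem.Set.add acc x := by
      simp [PySem.Set.add, hxh]
      split <;> simp
    rw [List.foldl, hstep, ih _ (fun y hy => hno y (by simp [hy])), List.foldl]

-- the recursive head-and-filter dedup computes PySem.List.dedup
theorem pvAltDedup_eq_dedup (xs : List (String × String)) :
    altDedup xs = PySem.List.dedup xs := by
  induction hn : xs.length using Nat.strong_induction_on generalizing xs with
  | _ n ih =>
    match xs, hn with
    | [], _ => simp [altDedup, PySem.List.dedup, PySem.Set.ofList]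
    | h :: t, hn =>
      have hfl : (t.filter (fun x => !(x == h))).length < n := by
        subst hn
        exact Nat.lt_succ_of_le (List.length_filter_le _ _)
      have hrec := ih _ hfl (t.filter (fun x => !(x == h))) rfl
      rw [altDedup, hrec]
      show h :: List.foldl PySem.Set.add PySem.Set.empty _
          = List.foldl PySem.Set.add PySem.Set.empty (h :: t)
      rw [List.foldl]
      have h1 : PySem.Set.add PySem.Set.empty h = [h] := rfl
      rw [h1, pvFoldl_add_filter h t ([h]) (by simp),
        show ([h] : PySem.Set (String × String)) = h :: ([] : PySem.Set (String × String)) from rfl,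
        pvFoldl_add_cons h _ _ (by
          intro x hx
          have := List.of_mem_filter hx
          simpa using this)]
      rfl

-- ===== VERDICT =====
theorem getCompetitionStageFormattedData_spec : Claim_equal_getCompetitionStageFormattedData := by
  intro jsonData _ _
  show PySem.List.dedup (jsonData.foldl (fun acc x => acc ++ [pvExtract x]) [])
      = altDedup (jsonData.map pvExtract)
  rw [pvBuild_eq_map, pvAltDedup_eq_dedup]
  simp
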